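-- pv_equiv track=rewrite | github.com/ydb-platform/ydb | contrib/python/clickhouse-driver/py3/clickhouse_driver/util/helpers.py | column_chunks
-- ===== SOURCE A (Python) =====
-- from itertools import islice, tee
--
-- def chunks(seq, n):
--     # islice is MUCH slower than slice for lists and tuples.
--     if isinstance(seq, (list, tuple)):
--         i = 0
--         item = seq[i:i+n]
--         while item:
--             yield list(item)
--             i += n
--             item = seq[i:i+n]
--
--     else:
--         it = iter(seq)
--         item = list(islice(it, n))
--         while item:
--             yield item
--             item = list(islice(it, n))
--
-- def column_chunks(columns, n):
--     for column in columns: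
--         if not isinstance(column, (list, tuple)):
--             raise TypeError(
--                 'Unsupported column type: {}. list or tuple is expected.'
--                 .format(type(column))
--             )
--
--     # create chunk generator for every column
--     g = [chunks(column, n) for column in columns]
--
--     while True:
--         # get next chunk for every column
--         item = [next(column, []) for column in g]
--         if not any(item):
--             break
--         yield item
-- ===== SOURCE B (Python) =====
-- def column_chunks(columns, n):
--     for column in columns:
--         if not isinstance(column, (list, tuple)):
--             raise TypeError(
--                 'Unsupported column type: {}. list or tuple is expected.'
--                 .format(type(column))
--             )
--
--     # single shared index instead of per-column chunk generators
--     i = 0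
--     while True:
--         item = [list(column[i:i + n]) for column in columns]
--         if not any(item):
--             return
--         yield item
--         i += n
-- ===== Notes on version B (the rewrite author's own statement) =====
-- stated objective: simpler
-- what changed: Replaces the per-column chunk generators and the next(gen, []) orchestration loop with a single while loop that slices every column at one shared index i and stops when all slices are empty.
import Mathlib
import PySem

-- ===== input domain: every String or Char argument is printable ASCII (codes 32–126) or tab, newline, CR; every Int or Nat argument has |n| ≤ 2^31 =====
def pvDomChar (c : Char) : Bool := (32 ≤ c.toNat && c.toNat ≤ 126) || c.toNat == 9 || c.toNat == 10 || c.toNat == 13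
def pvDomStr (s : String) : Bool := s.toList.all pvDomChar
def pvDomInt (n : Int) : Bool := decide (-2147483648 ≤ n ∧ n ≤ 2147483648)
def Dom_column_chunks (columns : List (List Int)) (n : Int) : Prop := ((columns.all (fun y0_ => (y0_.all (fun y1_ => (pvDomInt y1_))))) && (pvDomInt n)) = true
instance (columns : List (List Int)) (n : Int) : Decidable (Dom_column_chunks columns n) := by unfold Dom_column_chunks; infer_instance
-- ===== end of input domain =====

-- B replaces A's per-column chunk generators (advanced in lockstep with next(gen, [])) by one while
-- loop slicing every column at a single shared index: a simpler decomposition, same cost.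
-- Both Pythons are generators; the equivalence is about the list of yielded items.

-- ===== PORT A =====
-- chunks(seq, n) for a list seq: slices at i = 0, n, 2n, … while the slice is nonempty.
-- fuel (pvMaxLen columns + 1 at the call sites) is only a totality device; it is never exhausted before the loop's own stop.
def pvChunksGo (seq : List Int) (n : Int) : Int → Nat → List (List Int)
  | _, 0 => []
  | i, f + 1 =>
    let item := PySem.List.slice seq (some i) (some (i + n))
    if item = [] then [] else item :: pvChunksGo seq n (i + n) f

-- the while-loop of column_chunks: item = [next(column, []) for column in g]; if not any(item): break; yield item
def pvNextLoop : List (List (List Int)) → Nat → List (List (List Int))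
  | _, 0 => []
  | gs, f + 1 =>
    let item := gs.map (fun g => g.headD [])
    if item.any (fun x => !x.isEmpty) then item :: pvNextLoop (gs.map List.tail) f else []

def pvMaxLen (columns : List (List Int)) : Nat := columns.foldl (fun m c => max m c.length) 0

def column_chunks (columns : List (List Int)) (n : Int) : List (List (List Int)) :=
  pvNextLoop (columns.map (fun c => pvChunksGo c n 0 (pvMaxLen columns + 1))) (pvMaxLen columns + 1)

-- ===== PORT B =====
-- one loop: item = [list(column[i:i+n]) for column in columns]; if not any(item): return; yield item; i += n
def pvAltGo (columns : List (List Int)) (n : Int) : Int → Nat → List (List (List Int))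
  | _, 0 => []
  | i, f + 1 =>
    let item := columns.map (fun c => PySem.List.slice c (some i) (some (i + n)))
    if item.any (fun x => !x.isEmpty) then item :: pvAltGo columns n (i + n) f else []

def column_chunks_alt (columns : List (List Int)) (n : Int) : List (List (List Int)) :=
  pvAltGo columns n 0 (pvMaxLen columns + 1)

-- ===== PRECONDITION & SPEC =====
def Spec_column_chunks (columns : List (List Int)) (n : Int) (out : List (List (List Int))) : Prop := out = column_chunks_alt columns n
instance (columns : List (List Int)) (n : Int) (out : List (List (List Int))) : Decidable (Spec_column_chunks columns n out) := by unfold Spec_column_chunks; infer_instance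

-- ===== CLAIM (what is proved, stated in full; the proofs are below) =====
def Claim_equal_column_chunks : Prop := ∀ (columns : List (List Int)) (n : Int), Dom_column_chunks columns n → Spec_column_chunks columns n (column_chunks columns n)

-- ===== LEMMAS AND PROOFS =====

-- xs[a:b] is empty when b ≤ a and clamping cannot cross the sign boundary (0 ≤ b, or a < 0)
theorem pv_slice_nil (xs : List Int) (a b : Int) (h : b ≤ a) (h2 : 0 ≤ b ∨ a < 0) :
    PySem.List.slice xs (some a) (some b) = [] := by
  have hm : PySem.List.clampIdx xs.length b ≤ PySem.List.clampIdx xs.length a := by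
    unfold PySem.List.clampIdx; split_ifs <;> omega
  simp [PySem.List.slice, Nat.sub_eq_zero_of_le hm]

theorem pv_slice_nil_of_len_le (xs : List Int) (a b : Int) (h0 : 0 ≤ a) (h : (xs.length : Int) ≤ a) :
    PySem.List.slice xs (some a) (some b) = [] := by
  have hm : PySem.List.clampIdx xs.length b ≤ PySem.List.clampIdx xs.length a := by
    unfold PySem.List.clampIdx; split_ifs <;> omega
  simp [PySem.List.slice, Nat.sub_eq_zero_of_le hm]

theorem pv_slice_ne_nil (xs : List Int) (i n : Int) (h0 : 0 ≤ i) (hlt : i < (xs.length : Int)) (hn : 1 ≤ n) :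
    PySem.List.slice xs (some i) (some (i + n)) ≠ [] := by
  have hlen : (PySem.List.slice xs (some i) (some (i + n))).length ≠ 0 := by
    simp only [PySem.List.slice, PySem.List.clampIdx, List.length_take, List.length_drop]
    split_ifs <;> omega
  intro hc; rw [hc] at hlen; simp at hlen

-- the generator is spent after the step to i + n in each of these situations
theorem pv_chunks_dead (c : List Int) (n i : Int) (F : Nat)
    (h : (0 ≤ i ∧ 1 ≤ n ∧ PySem.List.slice c (some i) (some (i + n)) = [])
       ∨ (0 ≤ i ∧ i + n < 0) ∨ (n = 0 ∧ 0 ≤ i)) :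
    pvChunksGo c n (i + n) F = [] := by
  have hnil : PySem.List.slice c (some (i + n)) (some (i + n + n)) = [] := by
    rcases h with ⟨h0, hn, hs⟩ | ⟨h0, hneg⟩ | ⟨h0, hi⟩
    · have hlen : (c.length : Int) ≤ i := by
        by_contra hlt
        exact pv_slice_ne_nil c i n h0 (by omega) hn hs
      exact pv_slice_nil_of_len_le c _ _ (by omega) (by omega)
    · exact pv_slice_nil c _ _ (by omega) (by omega)
    · exact pv_slice_nil c _ _ (by omega) (by omega)
  cases F with
  | zero => rfl
  | succ f => simp [pvChunksGo, hnil]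

theorem pv_nextLoop_nil (cols : List (List Int)) (F : Nat) :
    pvNextLoop (cols.map (fun _ => ([] : List (List Int)))) F = [] := by
  cases F with
  | zero => rfl
  | succ f => simp [pvNextLoop]

theorem pv_altGo_nil (columns : List (List Int)) (n i : Int) (F : Nat)
    (h : ∀ c ∈ columns, PySem.List.slice c (some i) (some (i + n)) = []) :
    pvAltGo columns n i F = [] := by
  cases F with
  | zero => rfl
  | succ f =>
    simp only [pvAltGo]
    have : (columns.map (fun c => PySem.List.slice c (some i) (some (i + n)))).any
        (fun x => !x.isEmpty) = false := by
      simp [List.any_eq_false]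
      intro c hc; simp [h c hc]
    simp [this]

-- both loops, run with the same fuel from the same index, yield the same rows
theorem pv_main (columns : List (List Int)) (n : Int) :
    ∀ (F : Nat) (i : Int), 0 ≤ i →
      pvNextLoop (columns.map (fun c => pvChunksGo c n i F)) F = pvAltGo columns n i F := by
  intro F
  induction F with
  | zero => intro i h0; rfl
  | succ f ih =>
    intro i h0
    have hhead : (columns.map (fun c => pvChunksGo c n i (f + 1))).map (fun g => g.headD [])
        = columns.map (fun c => PySem.List.slice c (some i) (some (i + n))) := by
      rw [List.map_map]
      refine List.map_congr_left (fun c _ => ?_)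
      simp only [Function.comp, pvChunksGo]
      by_cases hs : PySem.List.slice c (some i) (some (i + n)) = [] <;> simp [hs]
    simp only [pvNextLoop, pvAltGo, hhead]
    by_cases hany : (columns.map (fun c => PySem.List.slice c (some i) (some (i + n)))).any
        (fun x => !x.isEmpty) = true
    · simp only [hany, if_true]
      congr 1
      by_cases hn : 1 ≤ n
      · -- chunk size ≥ 1: each tail is the generator restarted at i + n
        have htail : (columns.map (fun c => pvChunksGo c n i (f + 1))).map List.tail
            = columns.map (fun c => pvChunksGo c n (i + n) f) := by
          rw [List.map_map]
          refine List.map_congr_left (fun c _ => ?_)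
          simp only [Function.comp, pvChunksGo]
          by_cases hs : PySem.List.slice c (some i) (some (i + n)) = []
          · simp [hs, pv_chunks_dead c n i f (Or.inl ⟨h0, hn, hs⟩)]
          · simp [hs]
        rw [htail]
        exact ih (i + n) (by omega)
      · -- n ≤ 0: a nonempty slice at a nonnegative i forces i + n < 0, and then everything is spent
        have hne : ∃ c ∈ columns, PySem.List.slice c (some i) (some (i + n)) ≠ [] := by
          rcases List.any_eq_true.mp hany with ⟨x, hx, hxe⟩
          rcases List.mem_map.mp hx with ⟨c, hc, rfl⟩
          exact ⟨c, hc, by simpa using hxe⟩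
        have hneg : i + n < 0 := by
          by_contra hge
          rcases hne with ⟨c, hc, hcne⟩
          exact hcne (pv_slice_nil c i (i + n) (by omega) (by omega))
        have htail : (columns.map (fun c => pvChunksGo c n i (f + 1))).map List.tail
            = columns.map (fun _ => ([] : List (List Int))) := by
          rw [List.map_map]
          refine List.map_congr_left (fun c _ => ?_)
          simp only [Function.comp, pvChunksGo]
          by_cases hs : PySem.List.slice c (some i) (some (i + n)) = []
          · simp [hs]
          · simp [hs, pv_chunks_dead c n i f (Or.inr (Or.inl ⟨h0, hneg⟩))]
        rw [htail, pv_nextLoop_nil]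
        rw [pv_altGo_nil columns n (i + n) f
          (fun c _ => pv_slice_nil c _ _ (by omega) (by omega))]
    · simp only [Bool.not_eq_true] at hany
      simp [hany]

-- ===== VERDICT (by name: the statement is the Claim_ definition above) =====
theorem column_chunks_spec : Claim_equal_column_chunks := by
  intro columns n _
  unfold Spec_column_chunks column_chunks column_chunks_alt
  exact pv_main columns n (pvMaxLen columns + 1) 0 le_rfl
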